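-- pv_equiv track=rewrite | github.com/rhizomes-project/rhizomes-etl | etl/tools.py | remove_author_job_desc
-- ===== SOURCE A (Python) =====
-- def remove_author_job_desc(values):
--
--     DESC_LIST = [
--         ", Artist",
--         ", Author",
--         ", Collaborator",
--         ", Compiler",
--         ", Contributor",
--         ", Creator",
--         ", Editor",
--         ", Interviewer",
--         ", Occupant ",
--         ", Organizer",
--         ", Photographer",
--         ", Speaker",
--     ]
--
--     if type(values) is not list:
--
--         values = [ values ]
--
--     for idx, value in enumerate(values):
--
--         for desc in DESC_LIST:
--
--             if value.endswith(desc):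
--
--                 value = value[ : len(desc) * -1 ]
--                 values[idx] = value
--                 break
--
--     for idx, value in enumerate(values):
--
--         if value.endswith(")"):
--
--             pos = value.find("(")
--             if pos > 8:
--
--                 values[idx] = value[ : pos]
--
--     return values
-- ===== SOURCE B (Python) =====
-- _ROLES = {
--     "Artist", "Author", "Collaborator", "Compiler", "Contributor", "Creator",
--     "Editor", "Interviewer", "Occupant ", "Organizer", "Photographer", "Speaker",
-- }
--
--
-- def remove_author_job_desc(values):
--     # Return-value equivalent to A; like A, mutates the list in place.
--     if type(values) is not list:
--         values = [values]
--     for idx, value in enumerate(values):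
--         head, sep, tail = value.rpartition(", ")
--         if sep and tail in _ROLES:
--             value = head
--         if value.endswith(")") and value.find("(") > 8:
--             value = value[: value.find("(")]
--         values[idx] = value
--     return values
-- ===== Notes on version B (the rewrite author's own statement) =====
-- stated objective: faster
-- what changed: Instead of scanning the 12-entry DESC_LIST with endswith per element and a second paren-trimming pass, B does one pass that rpartitions each value on the last ', ' and checks the tail against a set of role words, fusing the paren trim into the same loop.
import Mathlib
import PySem

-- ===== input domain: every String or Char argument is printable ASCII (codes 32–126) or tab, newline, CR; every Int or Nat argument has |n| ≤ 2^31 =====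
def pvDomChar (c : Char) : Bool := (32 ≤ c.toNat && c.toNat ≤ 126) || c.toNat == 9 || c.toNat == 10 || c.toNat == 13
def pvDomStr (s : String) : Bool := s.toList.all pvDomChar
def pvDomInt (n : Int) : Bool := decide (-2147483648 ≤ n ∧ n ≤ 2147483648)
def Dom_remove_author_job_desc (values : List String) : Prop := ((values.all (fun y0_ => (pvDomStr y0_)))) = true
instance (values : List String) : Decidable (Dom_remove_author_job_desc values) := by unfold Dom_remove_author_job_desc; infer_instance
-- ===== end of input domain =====

-- B replaces A's 12-fold endswith scan by one rpartition-on-", " + set lookup per element,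
-- fused with the paren-trimming pass into a single loop (idiomatic; return value only — the
-- Python versions also mutate the input list in place identically).


-- ===== PORT A =====
-- DESC_LIST, as code-point lists
def pvDescs : List (List Char) :=
  [(", Artist").toList, (", Author").toList, (", Collaborator").toList, (", Compiler").toList,
   (", Contributor").toList, (", Creator").toList, (", Editor").toList, (", Interviewer").toList,
   (", Occupant ").toList, (", Organizer").toList, (", Photographer").toList, (", Speaker").toList]

-- A's inner 'for desc in DESC_LIST: … break' loop on one value
def pvALoop : List (List Char) → List Char → List Char
  | [], v => v
  | d :: ds, v =>
      if PySem.Chars.endswith v d then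
        PySem.Chars.slice v none (some ((PySem.Chars.len d : Int) * -1))   -- value[: len(desc) * -1]
      else pvALoop ds v

-- A's second pass, on one value
def pvAParen (v : List Char) : List Char :=
  if PySem.Chars.endswith v [')'] then
    let pos := PySem.Chars.find v ['(']
    if pos > 8 then PySem.Chars.slice v none (some pos) else v
  else v

def remove_author_job_desc (values : List String) : List String :=
  ((values.map (fun v => String.ofList (pvALoop pvDescs v.toList))).map
    (fun v => String.ofList (pvAParen v.toList)))

-- ===== PORT B =====
-- the role words (the _ROLES set; "Occupant " keeps its trailing space)
def pvRoles : List (List Char) :=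
  [("Artist").toList, ("Author").toList, ("Collaborator").toList, ("Compiler").toList,
   ("Contributor").toList, ("Creator").toList, ("Editor").toList, ("Interviewer").toList,
   ("Occupant ").toList, ("Organizer").toList, ("Photographer").toList, ("Speaker").toList]

-- hand port of str.rpartition(", ") (PySem has no rpartition): split at the LAST ", ";
-- none = separator absent (Python's ("", "", value) with falsy sep)
def pvRp : List Char → Option (List Char × List Char)
  | [] => none
  | c :: rest =>
      match pvRp rest with
      | some (h, t) => some (c :: h, t)
      | none => if c = ',' ∧ rest.head? = some ' ' then some ([], rest.tail) else none

-- B's loop body on one value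
def pvBElem (v : List Char) : List Char :=
  let v1 := match pvRp v with
    | some (h, t) => if t ∈ pvRoles then h else v
    | none => v
  if PySem.Chars.endswith v1 [')'] ∧ PySem.Chars.find v1 ['('] > 8 then
    PySem.Chars.slice v1 none (some (PySem.Chars.find v1 ['(']))
  else v1

def remove_author_job_desc_alt (values : List String) : List String :=
  values.map (fun v => String.ofList (pvBElem v.toList))

-- ===== PRECONDITION & SPEC =====
def Spec_remove_author_job_desc (values : List String) (out : List String) : Prop := out = remove_author_job_desc_alt values
instance (values : List String) (out : List String) : Decidable (Spec_remove_author_job_desc values out) := by unfold Spec_remove_author_job_desc; infer_instance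

-- ===== CLAIM (what is proved, stated in full; the proofs are below) =====
def Claim_equal_remove_author_job_desc : Prop := ∀ (values : List String), Dom_remove_author_job_desc values → Spec_remove_author_job_desc values (remove_author_job_desc values)

-- ===== LEMMAS AND PROOFS =====

theorem pvRp_cons_none {c : Char} {t : List Char} (h : pvRp (c :: t) = none) : pvRp t = none := by
  rw [pvRp] at h
  cases ht : pvRp t with
  | some p => obtain ⟨x, y⟩ := p; rw [ht] at h; simp at h
  | none => rfl

theorem pvRp_sound {s h t : List Char} (hs : pvRp s = some (h, t)) :
    s = h ++ ',' :: ' ' :: t ∧ pvRp t = none := by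
  induction s generalizing h t with
  | nil => simp [pvRp] at hs
  | cons c rest ih =>
      rw [pvRp] at hs
      cases hr : pvRp rest with
      | some p =>
          obtain ⟨h', t'⟩ := p
          rw [hr] at hs
          simp only [Option.some.injEq, Prod.mk.injEq] at hs
          obtain ⟨rfl, rfl⟩ := hs
          obtain ⟨he, hn⟩ := ih hr
          exact ⟨by rw [he]; rfl, hn⟩
      | none =>
          rw [hr] at hs
          split_ifs at hs with hc
          · obtain ⟨hc1, hc2⟩ := hc
            cases rest with
            | nil => simp at hc2
            | cons a r =>
                simp only [List.head?_cons, Option.some.injEq] at hc2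
                simp only [List.tail_cons, Option.some.injEq, Prod.mk.injEq] at hs
                obtain ⟨hh, htt⟩ := hs
                subst hc1; subst hc2
                constructor
                · rw [← hh, ← htt]; rfl
                · rw [← htt]
                  exact pvRp_cons_none hr

theorem pvRp_complete (h t : List Char) (ht : pvRp t = none) :
    pvRp (h ++ ',' :: ' ' :: t) = some (h, t) := by
  induction h with
  | nil =>
      show pvRp (',' :: ' ' :: t) = some ([], t)
      rw [pvRp]
      have h2 : pvRp (' ' :: t) = none := by
        rw [pvRp, ht]; simp
      rw [h2]; simp
  | cons c h ih =>
      show pvRp (c :: (h ++ ',' :: ' ' :: t)) = some (c :: h, t)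
      rw [pvRp, ih]

-- a role suffix determines pvRp's answer
theorem pvRp_of_suffix {s r : List Char} (hsuf : (',' :: ' ' :: r) <:+ s) (hr : pvRp r = none) :
    ∃ h, s = h ++ ',' :: ' ' :: r ∧ pvRp s = some (h, r) := by
  obtain ⟨h, rfl⟩ := hsuf
  exact ⟨h, rfl, pvRp_complete h r hr⟩

theorem pvRoles_rp_none : ∀ r ∈ pvRoles, pvRp r = none := by decide

theorem pvDescs_eq : pvDescs = pvRoles.map (fun r => ',' :: ' ' :: r) := by decide

-- A's inner loop computes exactly the rpartition test, for any list of well-formed suffixes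
theorem pvALoop_eq (ds : List (List Char))
    (hds : ∀ d ∈ ds, ∃ r, d = ',' :: ' ' :: r ∧ pvRp r = none) (s : List Char) :
    pvALoop ds s = (match pvRp s with
      | some (h, t) => if (',' :: ' ' :: t) ∈ ds then h else s
      | none => s) := by
  induction ds with
  | nil =>
      cases hrp : pvRp s <;> simp [pvALoop]
  | cons d ds ih =>
      obtain ⟨r, rfl, hrnone⟩ := hds d (List.mem_cons_self ..)
      rw [pvALoop]
      by_cases hend : PySem.Chars.endswith s (',' :: ' ' :: r) = true
      · rw [if_pos hend]
        have hsuf : (',' :: ' ' :: r) <:+ s := (PySem.Chars.endswith_iff ..).mp hend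
        obtain ⟨h, hseq, hrp⟩ := pvRp_of_suffix hsuf hrnone
        rw [hrp]
        show PySem.Chars.slice s none (some (PySem.Chars.len (',' :: ' ' :: r) * -1))
            = if (',' :: ' ' :: r) ∈ (',' :: ' ' :: r) :: ds then h else s
        rw [if_pos (List.mem_cons_self ..)]
        have hcast : PySem.Chars.len (',' :: ' ' :: r) * -1
            = -(((r.length + 2 : Nat)) : Int) := by
          simp only [PySem.Chars.len_eq, List.length_cons]
          push_cast
          ring
        rw [PySem.Chars.slice_eq_listSlice, hcast,
            PySem.List.slice_to_neg_natCast s (r.length + 2) (by omega), hseq]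
        have hl : (h ++ ',' :: ' ' :: r).length - (r.length + 2) = h.length := by
          simp
        rw [hl]
        exact List.take_left ..

      · rw [if_neg hend]
        rw [ih (fun d hd => hds d (List.mem_cons_of_mem _ hd))]
        cases hrp : pvRp s with
        | none => rfl
        | some p =>
            obtain ⟨h, t⟩ := p
            obtain ⟨hseq, -⟩ := pvRp_sound hrp
            by_cases heq : (',' :: ' ' :: t) = (',' :: ' ' :: r)
            · exfalso
              apply hend
              rw [PySem.Chars.endswith_iff, ← heq, hseq]
              exact List.suffix_append h _
            · simp only [List.mem_cons]
              rw [if_congr (Iff.symm (or_iff_right heq)) rfl rfl]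

-- A's first pass equals B's rpartition stage
theorem pvStage1_eq (s : List Char) :
    pvALoop pvDescs s = (match pvRp s with
      | some (h, t) => if t ∈ pvRoles then h else s
      | none => s) := by
  have hds : ∀ d ∈ pvDescs, ∃ r, d = ',' :: ' ' :: r ∧ pvRp r = none := by
    intro d hd
    rw [pvDescs_eq, List.mem_map] at hd
    obtain ⟨r, hr, rfl⟩ := hd
    exact ⟨r, rfl, pvRoles_rp_none r hr⟩
  rw [pvALoop_eq pvDescs hds s]
  cases hrp : pvRp s with
  | none => rfl
  | some p =>
      obtain ⟨h, t⟩ := p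
      show (if (',' :: ' ' :: t) ∈ pvDescs then h else s) = (if t ∈ pvRoles then h else s)
      have hmem : (',' :: ' ' :: t) ∈ pvDescs ↔ t ∈ pvRoles := by
        rw [pvDescs_eq, List.mem_map]
        constructor
        · rintro ⟨r, hr, heq⟩
          simp only [List.cons.injEq] at heq
          rwa [← heq.2.2]
        · intro ht; exact ⟨t, ht, rfl⟩
      rw [if_congr hmem rfl rfl]

-- A's second pass on a value equals B's fused condition
theorem pvStage2_eq (v : List Char) :
    pvAParen v = (if PySem.Chars.endswith v [')'] ∧ PySem.Chars.find v ['('] > 8 then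
      PySem.Chars.slice v none (some (PySem.Chars.find v ['('])) else v) := by
  rw [pvAParen]
  by_cases he : PySem.Chars.endswith v [')'] = true
  · simp only [he, if_true, true_and]
  · simp only [he, if_false, Bool.false_eq_true, false_and, if_false]

theorem pvElem_eq (s : List Char) : pvAParen (pvALoop pvDescs s) = pvBElem s := by
  rw [pvBElem, pvStage2_eq, pvStage1_eq]

-- ===== VERDICT (by name: the statement is the Claim_ definition above) =====
theorem remove_author_job_desc_spec : Claim_equal_remove_author_job_desc := by
  intro values _
  show _ = _
  rw [remove_author_job_desc, remove_author_job_desc_alt, List.map_map]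
  apply List.map_congr_left
  intro v _
  simp only [Function.comp, String.toList_ofList]
  rw [pvElem_eq]
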